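-- pv_equiv track=rewrite | github.com/Hellager/scripts | python/windows_installed/installed.py | compare_programs
-- ===== SOURCE A (Python) =====
-- def compare_programs(data, selected_hosts, compare_type):
--     """Compare programs between selected hosts"""
--     # Group programs by hostname
--     programs_by_host = {host: [] for host in selected_hosts}
--     for prog in data:
--         if prog['hostname'] in selected_hosts:
--             programs_by_host[prog['hostname']].append(prog)
--
--     # Create program name sets
--     program_sets = {
--         host: set(prog['name'] for prog in programs)
--         for host, programs in programs_by_host.items()
--     }
--
--     if compare_type == 'common':
--         # Find common programs
--         common_programs = set.intersection(*program_sets.values())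
--         result_programs = []
--         for prog in data:
--             if prog['hostname'] in selected_hosts and prog['name'] in common_programs:
--                 result_programs.append(prog)
--     else:  # compare_type == 'different'
--         # Find different programs
--         all_programs = set.union(*program_sets.values())
--         common_programs = set.intersection(*program_sets.values())
--         different_programs = all_programs - common_programs
--         result_programs = []
--         for prog in data:
--             if prog['hostname'] in selected_hosts and prog['name'] in different_programs:
--                 result_programs.append(prog)
--
--     return result_programs
-- ===== SOURCE B (Python) =====
-- def compare_programs(data, selected_hosts, compare_type):
--     """Compare programs between selected hosts (one count table for both modes)"""
--     # one name-set per distinct selected host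
--     name_sets = {}
--     for host in selected_hosts:
--         name_sets.setdefault(host, set())
--     for prog in data:
--         h = prog['hostname']
--         if h in name_sets:
--             name_sets[h].add(prog['name'])
--     # count, for each name, how many host sets contain it
--     num = len(name_sets)
--     counts = {}
--     for s in name_sets.values():
--         for n in s:
--             counts[n] = counts.get(n, 0) + 1
--     # common = in every set; different = in some set but not every set
--     chosen = {n for n, c in counts.items()
--               if (c == num if compare_type == 'common' else c < num)}
--     return [prog for prog in data
--             if prog['hostname'] in name_sets and prog['name'] in chosen]
-- ===== Notes on version B (the rewrite author's own statement) =====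
-- stated objective: idiomatic
-- what changed: Instead of folding set.intersection/union over the per-host name sets in two separate branches, B builds one frequency table counting in how many host sets each name appears and unifies both modes around it (count == num-hosts vs count < num-hosts), finishing with a single filtering comprehension.
import Mathlib
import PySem

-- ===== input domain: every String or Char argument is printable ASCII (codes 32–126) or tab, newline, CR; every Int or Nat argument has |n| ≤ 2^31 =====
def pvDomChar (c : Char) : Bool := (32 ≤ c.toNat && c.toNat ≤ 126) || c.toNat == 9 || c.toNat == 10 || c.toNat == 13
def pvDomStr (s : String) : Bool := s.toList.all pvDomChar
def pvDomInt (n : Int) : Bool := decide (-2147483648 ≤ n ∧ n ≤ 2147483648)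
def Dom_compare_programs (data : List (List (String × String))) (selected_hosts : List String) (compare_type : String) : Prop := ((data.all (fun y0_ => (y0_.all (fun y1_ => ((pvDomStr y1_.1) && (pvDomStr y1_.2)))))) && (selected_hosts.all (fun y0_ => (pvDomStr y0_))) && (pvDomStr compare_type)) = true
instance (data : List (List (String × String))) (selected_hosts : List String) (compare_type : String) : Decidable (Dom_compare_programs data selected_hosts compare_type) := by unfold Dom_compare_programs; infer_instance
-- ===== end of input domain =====

-- One honest line: B replaces A's two fold-of-set-intersections/unions branches by a single
-- per-name frequency table (count == / < number of host sets) and one final filter; idiomatic, not faster.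

-- prog[k] on a dict given as an association list: first match; Pre_ guarantees the key is present
-- wherever the Python actually subscripts, so the "" default is never observed inside Pre_.
def pvLook (prog : List (String × String)) (k : String) : String :=
  (List.lookup k prog).getD ""

-- ===== PORT A =====
def compare_programs (data : List (List (String × String))) (selected_hosts : List String) (compare_type : String) : List (List (String × String)) :=
  -- programs_by_host = {host: [] for host in selected_hosts}; then append each matching prog
  let pbh0 : PySem.Dict String (List (List (String × String))) :=
    selected_hosts.foldl (fun d h => d.insert h []) PySem.Dict.empty
  let pbh := data.foldl (fun d prog =>
    if selected_hosts.contains (pvLook prog "hostname") then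
      d.insert (pvLook prog "hostname") (d.getD (pvLook prog "hostname") [] ++ [prog])
    else d) pbh0
  -- program_sets = {host: set(prog['name'] for prog in programs) for host, programs in programs_by_host.items()}
  let psets : PySem.Dict String (PySem.Set String) :=
    pbh.items.foldl (fun d p => d.insert p.1 (PySem.Set.ofList (p.2.map (fun prog => pvLook prog "name")))) PySem.Dict.empty
  if compare_type == "common" then
    -- set.intersection(*program_sets.values());  [] branch unreachable inside Pre_ (Python raises TypeError there)
    let common := match psets.values with
      | [] => ([] : PySem.Set String)
      | s :: rest => rest.foldl PySem.Set.inter s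
    data.foldl (fun acc prog =>
      if selected_hosts.contains (pvLook prog "hostname") && PySem.Set.contains common (pvLook prog "name")
      then acc ++ [prog] else acc) []
  else
    let all_programs := match psets.values with
      | [] => ([] : PySem.Set String)
      | s :: rest => rest.foldl PySem.Set.union s
    let common := match psets.values with
      | [] => ([] : PySem.Set String)
      | s :: rest => rest.foldl PySem.Set.inter s
    let diffp := PySem.Set.diff all_programs common
    data.foldl (fun acc prog =>
      if selected_hosts.contains (pvLook prog "hostname") && PySem.Set.contains diffp (pvLook prog "name")
      then acc ++ [prog] else acc) []

-- ===== PORT B =====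
def compare_programs_alt (data : List (List (String × String))) (selected_hosts : List String) (compare_type : String) : List (List (String × String)) :=
  -- name_sets: one name set per distinct selected host
  let ns0 : PySem.Dict String (PySem.Set String) :=
    selected_hosts.foldl (fun d h => d.setdefault h PySem.Set.empty) PySem.Dict.empty
  let nameSets := data.foldl (fun d prog =>
    let h := pvLook prog "hostname"
    if d.contains h then d.insert h (PySem.Set.add (d.getD h []) (pvLook prog "name")) else d) ns0
  let num : Int := (nameSets.size : Int)
  -- counts[n] = number of host sets containing n
  let counts : PySem.Dict String Int :=
    nameSets.values.foldl (fun c s => s.foldl (fun c n => c.insert n (c.getD n 0 + 1)) c) PySem.Dict.empty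
  let chosen : PySem.Set String :=
    counts.items.foldl (fun s p =>
      if (if compare_type == "common" then p.2 == num else p.2 < num)
      then PySem.Set.add s p.1 else s) PySem.Set.empty
  data.filter (fun prog =>
    nameSets.contains (pvLook prog "hostname") && PySem.Set.contains chosen (pvLook prog "name"))

-- ===== PRECONDITION & SPEC =====
-- Pre_ excludes exactly the inputs on which the Python A raises: empty selected_hosts
-- (set.intersection with no arguments: TypeError), a record without a 'hostname' key (KeyError),
-- and a selected record without a 'name' key (KeyError).
def Pre_compare_programs (data : List (List (String × String))) (selected_hosts : List String) (compare_type : String) : Prop :=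
  selected_hosts ≠ [] ∧
  ∀ prog ∈ data, (List.lookup "hostname" prog).isSome = true ∧
    (((List.lookup "hostname" prog).getD "") ∈ selected_hosts → (List.lookup "name" prog).isSome = true)
instance (data : List (List (String × String))) (selected_hosts : List String) (compare_type : String) : Decidable (Pre_compare_programs data selected_hosts compare_type) := by unfold Pre_compare_programs; infer_instance
def pvWitness_compare_programs : (List (List (String × String))) × List String × String :=
  ([[("hostname", "h1"), ("name", "a")], [("hostname", "h2"), ("name", "a")]], ["h1", "h2"], "common")

def Spec_compare_programs (data : List (List (String × String))) (selected_hosts : List String) (compare_type : String) (out : List (List (String × String))) : Prop := out = compare_programs_alt data selected_hosts compare_type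
instance (data : List (List (String × String))) (selected_hosts : List String) (compare_type : String) (out : List (List (String × String))) : Decidable (Spec_compare_programs data selected_hosts compare_type out) := by unfold Spec_compare_programs; infer_instance

-- ===== CLAIM (what is proved, stated in full; the proofs are below) =====
def Claim_equal_compare_programs : Prop := ∀ (data : List (List (String × String))) (selected_hosts : List String) (compare_type : String), Dom_compare_programs data selected_hosts compare_type → Pre_compare_programs data selected_hosts compare_type → Spec_compare_programs data selected_hosts compare_type (compare_programs data selected_hosts compare_type)

-- ===== LEMMAS AND PROOFS =====

def pvGrp (data : List (List (String × String))) (hosts : List String) (h : String) :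
    List (List (String × String)) :=
  data.filter (fun prog => hosts.contains (pvLook prog "hostname") && (pvLook prog "hostname" == h))
def pvNset (data : List (List (String × String))) (hosts : List String) (h : String) :
    PySem.Set String :=
  PySem.Set.ofList ((pvGrp data hosts h).map (fun prog => pvLook prog "name"))

-- generic membership of fold-inter / fold-union / conditional add
lemma pv_mem_foldl_inter (ts : List (PySem.Set String)) (s : PySem.Set String) (y : String) :
    y ∈ ts.foldl PySem.Set.inter s ↔ y ∈ s ∧ ∀ t ∈ ts, y ∈ t := by
  induction ts generalizing s with
  | nil => simp
  | cons t ts ih => simp [ih, PySem.Set.mem_inter]; tauto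

lemma pv_mem_foldl_union (ts : List (PySem.Set String)) (s : PySem.Set String) (y : String) :
    y ∈ ts.foldl PySem.Set.union s ↔ y ∈ s ∨ ∃ t ∈ ts, y ∈ t := by
  induction ts generalizing s with
  | nil => simp
  | cons t ts ih => simp [ih, PySem.Set.mem_union]; tauto

lemma pv_mem_foldl_add_if {β : Type} (P : β → Bool) (k : β → String) (items : List β)
    (s0 : PySem.Set String) (y : String) :
    (y ∈ items.foldl (fun s p => if P p then PySem.Set.add s (k p) else s) s0) ↔
      y ∈ s0 ∨ ∃ p ∈ items, P p ∧ k p = y := by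
  induction items generalizing s0 with
  | nil => simp
  | cons a l ih =>
      simp only [List.foldl_cons, ih, List.mem_cons]
      by_cases h : P a = true <;>
        simp only [h, if_true, if_false, Bool.false_eq_true, PySem.Set.mem_add] <;>
        constructor
      · rintro ((hy|hy) | ⟨p, hp, hP, hk⟩)
        · exact Or.inl hy
        · exact Or.inr ⟨a, Or.inl rfl, h, hy.symm⟩
        · exact Or.inr ⟨p, Or.inr hp, hP, hk⟩
      · rintro (hy | ⟨p, (rfl|hp), hP, hk⟩)
        · exact Or.inl (Or.inl hy)
        · exact Or.inl (Or.inr hk.symm)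
        · exact Or.inr ⟨p, hp, hP, hk⟩
      · rintro (hy | ⟨p, hp, hP, hk⟩)
        · exact Or.inl hy
        · exact Or.inr ⟨p, Or.inr hp, hP, hk⟩
      · rintro (hy | ⟨p, (rfl|hp), hP, hk⟩)
        · exact Or.inl hy
        · exact absurd hP (by simp [h])
        · exact Or.inr ⟨p, hp, hP, hk⟩

-- constant-insert initial dict: every getD with that constant default is the constant
lemma pv_getD_foldl_insert_const {κ ν : Type} [BEq κ] [LawfulBEq κ] [DecidableEq κ]
    (l : List κ) (c : ν) (d : PySem.Dict κ ν) (hd : ∀ y, d.getD y c = c) (x : κ) :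
    (l.foldl (fun d h => d.insert h c) d).getD x c = c := by
  induction l generalizing d with
  | nil => exact hd x
  | cons a l ih =>
      refine ih _ (fun y => ?_)
      rw [PySem.Dict.getD_insert]
      split
      · rfl
      · exact hd y

-- A's grouping loop: value at h accumulates exactly pvGrp, keys unchanged
lemma pv_pbh_spec (hosts : List String) (data : List (List (String × String)))
    (d : PySem.Dict String (List (List (String × String))))
    (hd : ∀ x ∈ hosts, d.contains x = true) :
    (data.foldl (fun d prog =>
        if hosts.contains (pvLook prog "hostname") then
          d.insert (pvLook prog "hostname") (d.getD (pvLook prog "hostname") [] ++ [prog])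
        else d) d).keys = d.keys ∧
    ∀ h, (data.foldl (fun d prog =>
        if hosts.contains (pvLook prog "hostname") then
          d.insert (pvLook prog "hostname") (d.getD (pvLook prog "hostname") [] ++ [prog])
        else d) d).getD h [] = d.getD h [] ++ pvGrp data hosts h := by
  induction data generalizing d with
  | nil => exact ⟨rfl, fun h => by simp [pvGrp]⟩
  | cons a l ih =>
      by_cases hc : hosts.contains (pvLook a "hostname") = true
      · have hca : d.contains (pvLook a "hostname") = true := by
          exact hd _ (by simpa using hc)
        have hd' : ∀ x ∈ hosts,
            (d.insert (pvLook a "hostname") (d.getD (pvLook a "hostname") [] ++ [a])).contains x = true := by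
          intro x hx
          rw [PySem.Dict.contains_insert]
          simp [hd x hx]
        obtain ⟨hk, hv⟩ := ih _ hd'
        constructor
        · simp only [List.foldl_cons, hc, if_true]
          rw [hk, PySem.Dict.keys_insert_of_contains _ _ hca]
        · intro h
          simp only [List.foldl_cons, hc, if_true]
          rw [hv h, PySem.Dict.getD_insert]
          simp only [pvGrp, List.filter_cons]
          by_cases he : pvLook a "hostname" = h
          · simp only [he, if_true, beq_self_eq_true, Bool.and_true, List.append_assoc,
              List.cons_append, List.nil_append]
            have hmem : h ∈ hosts := by rw [← he]; simpa using hc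
            simp [hmem]
          · have : (pvLook a "hostname" == h) = false := by simp [he]
            simp [Ne.symm he, this]
      · obtain ⟨hk, hv⟩ := ih d hd
        constructor
        · simpa only [List.foldl_cons, hc, if_false] using hk
        · intro h
          simp only [List.foldl_cons, Bool.not_eq_true] at hc ⊢
          rw [hc]
          simp only [if_false, Bool.false_eq_true]
          rw [hv h]
          have : pvLook a "hostname" ∉ hosts := by simpa using hc
          simp [pvGrp, this]

lemma pv_pbh0_keys (hosts : List String) :
    (hosts.foldl (fun d h => d.insert h ([] : List (List (String × String)))) PySem.Dict.empty).keys
      = PySem.Set.ofList hosts := by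
  rw [PySem.Dict.keys_foldl_insert hosts (fun _ _ => [])]
  simp [PySem.Set.update_nil_left]

lemma pv_psets_values (d0 : PySem.Dict String (List (List (String × String))))
    (hk : d0.keys.Nodup) :
    (d0.items.foldl (fun d p => d.insert p.1 (PySem.Set.ofList (p.2.map (fun prog => pvLook prog "name")))) PySem.Dict.empty).values
      = d0.items.map (fun p => PySem.Set.ofList (p.2.map (fun prog => pvLook prog "name"))) := by
  have h := PySem.Dict.items_foldl_insert_fresh d0.items (fun p => p.1)
      (fun p => PySem.Set.ofList (p.2.map (fun prog => pvLook prog "name")))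
      PySem.Dict.empty (by intro a _; exact PySem.Dict.contains_empty _)
      (by simpa [PySem.Dict.keys] using hk)
  simp only [PySem.Dict.values]
  rw [h]
  simp [Function.comp, PySem.Dict.empty]

def pvCond (data : List (List (String × String))) (hosts : List String) (ct : String)
    (prog : List (String × String)) : Bool :=
  hosts.contains (pvLook prog "hostname") &&
  (if ct == "common"
   then decide (∀ h ∈ PySem.Set.ofList hosts, pvLook prog "name" ∈ pvNset data hosts h)
   else decide ((∃ h ∈ PySem.Set.ofList hosts, pvLook prog "name" ∈ pvNset data hosts h) ∧
                ¬ ∀ h ∈ PySem.Set.ofList hosts, pvLook prog "name" ∈ pvNset data hosts h))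

lemma pv_A_char (data : List (List (String × String))) (hosts : List String) (ct : String)
    (hne : hosts ≠ []) :
    compare_programs data hosts ct = data.filter (pvCond data hosts ct) := by
  simp only [compare_programs]
  -- initial dict facts
  have hd0 : ∀ x ∈ hosts,
      (hosts.foldl (fun d h => d.insert h ([] : List (List (String × String)))) PySem.Dict.empty).contains x = true := by
    intro x hx
    rw [PySem.Dict.contains_eq_decide_mem_keys, pv_pbh0_keys]
    simp [PySem.Set.mem_ofList, hx]
  have hg0 : ∀ h, (hosts.foldl (fun d h => d.insert h ([] : List (List (String × String)))) PySem.Dict.empty).getD h [] = [] := by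
    intro h
    exact pv_getD_foldl_insert_const hosts [] _ (fun y => PySem.Dict.getD_empty _ _) h
  obtain ⟨hkeys, hval⟩ := pv_pbh_spec hosts data _ hd0
  have hknd : (data.foldl (fun d prog =>
      if hosts.contains (pvLook prog "hostname") then
        d.insert (pvLook prog "hostname") (d.getD (pvLook prog "hostname") [] ++ [prog])
      else d) (hosts.foldl (fun d h => d.insert h [] ) PySem.Dict.empty)).keys = PySem.Set.ofList hosts := by
    rw [hkeys, pv_pbh0_keys]
  have hnd : (data.foldl (fun d prog =>
      if hosts.contains (pvLook prog "hostname") then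
        d.insert (pvLook prog "hostname") (d.getD (pvLook prog "hostname") [] ++ [prog])
      else d) (hosts.foldl (fun d h => d.insert h [] ) PySem.Dict.empty)).keys.Nodup := by
    rw [hknd]; exact PySem.Set.nodup_ofList hosts
  have hitems := PySem.Dict.items_eq_map_keys _ hnd ([] : List (List (String × String)))
  have hvals : ((data.foldl (fun d prog =>
      if hosts.contains (pvLook prog "hostname") then
        d.insert (pvLook prog "hostname") (d.getD (pvLook prog "hostname") [] ++ [prog])
      else d) (hosts.foldl (fun d h => d.insert h [] ) PySem.Dict.empty)).items.foldl
        (fun d p => d.insert p.1 (PySem.Set.ofList (p.2.map (fun prog => pvLook prog "name")))) PySem.Dict.empty).values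
      = (PySem.Set.ofList hosts).map (fun h => pvNset data hosts h) := by
    rw [pv_psets_values _ hnd, hitems, hknd]
    simp only [List.map_map]
    refine List.map_congr_left (fun h _ => ?_)
    simp only [Function.comp_apply, pvNset]
    rw [hval h, hg0 h]
    simp
  obtain ⟨a, hs, rfl⟩ : ∃ a hs, hosts = a :: hs := by
    cases hosts with
    | nil => exact absurd rfl hne
    | cons a hs => exact ⟨a, hs, rfl⟩
  rw [hvals, PySem.Set.ofList_cons, List.map_cons]
  have hcommon : ∀ n : String,
      n ∈ (((PySem.Set.discard (PySem.Set.ofList hs) a).map (fun h => pvNset data (a :: hs) h)).foldl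
            PySem.Set.inter (pvNset data (a :: hs) a)) ↔
        ∀ h ∈ PySem.Set.ofList (a :: hs), n ∈ pvNset data (a :: hs) h := by
    intro n
    rw [pv_mem_foldl_inter, PySem.Set.ofList_cons]
    simp only [List.mem_map, List.mem_cons, PySem.Set.mem_discard, PySem.Set.mem_ofList]
    constructor
    · rintro ⟨ha, ht⟩ h (rfl | hh)
      · exact ha
      · exact ht _ ⟨h, ⟨hh.1, hh.2⟩, rfl⟩
    · intro H
      refine ⟨H a (Or.inl rfl), ?_⟩
      rintro t ⟨h, ⟨hh, hha⟩, rfl⟩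
      exact H h (Or.inr ⟨hh, hha⟩)
  have hunion : ∀ n : String,
      n ∈ (((PySem.Set.discard (PySem.Set.ofList hs) a).map (fun h => pvNset data (a :: hs) h)).foldl
            PySem.Set.union (pvNset data (a :: hs) a)) ↔
        ∃ h ∈ PySem.Set.ofList (a :: hs), n ∈ pvNset data (a :: hs) h := by
    intro n
    rw [pv_mem_foldl_union, PySem.Set.ofList_cons]
    simp only [List.mem_map, List.mem_cons, PySem.Set.mem_discard, PySem.Set.mem_ofList]
    constructor
    · rintro (hy | ⟨t, ⟨h, ⟨hh, hha⟩, rfl⟩, ht⟩)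
      · exact ⟨a, Or.inl rfl, hy⟩
      · exact ⟨h, Or.inr ⟨hh, hha⟩, ht⟩
    · rintro ⟨h, (rfl | ⟨hh, hha⟩), ht⟩
      · exact Or.inl ht
      · exact Or.inr ⟨_, ⟨h, ⟨hh, hha⟩, rfl⟩, ht⟩
  by_cases hct : (ct == "common") = true
  · simp only [hct, if_true]
    rw [PySem.List.foldl_append_if]
    simp only [List.nil_append, List.map_id']
    refine List.filter_congr (fun prog _ => ?_)
    rw [Bool.eq_iff_iff]
    simp only [pvCond, hct, if_true, Bool.and_eq_true, decide_eq_true_eq,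
      PySem.Set.contains_iff]
    exact and_congr_right fun _ => hcommon _
  · simp only [Bool.not_eq_true] at hct
    simp only [hct, Bool.false_eq_true, if_false]
    rw [PySem.List.foldl_append_if]
    simp only [List.nil_append, List.map_id']
    refine List.filter_congr (fun prog _ => ?_)
    rw [Bool.eq_iff_iff]
    simp only [pvCond, hct, Bool.false_eq_true, if_false, Bool.and_eq_true, decide_eq_true_eq,
      PySem.Set.contains_iff, PySem.Set.mem_diff]
    exact and_congr_right fun _ => and_congr (hunion _) (not_congr (hcommon _))

lemma pv_ns0_spec (l : List String) (d : PySem.Dict String (PySem.Set String)) :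
    ((l.foldl (fun d h => d.setdefault h PySem.Set.empty) d).keys = PySem.Set.update d.keys l) ∧
    (∀ x, (l.foldl (fun d h => d.setdefault h PySem.Set.empty) d).getD x [] = d.getD x []) := by
  induction l generalizing d with
  | nil => exact ⟨by simp [PySem.Set.update], fun x => rfl⟩
  | cons a l ih =>
      simp only [List.foldl_cons, PySem.Set.update_cons]
      by_cases hc : d.contains a = true
      · rw [PySem.Dict.setdefault_of_contains _ _ hc]
        have hmem : a ∈ d.keys := (PySem.Dict.contains_iff_mem_keys _ _).mp hc
        rw [PySem.Set.add_of_mem hmem]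
        exact ih d
      · have hc' : d.contains a = false := by simpa using hc
        rw [PySem.Dict.setdefault_of_not_contains _ _ hc']
        have hnm : a ∉ d.keys := fun hm =>
          by rw [(PySem.Dict.contains_iff_mem_keys _ _).mpr hm] at hc'; cases hc'
        obtain ⟨hk, hv⟩ := ih (d.insert a PySem.Set.empty)
        refine ⟨?_, ?_⟩
        · rw [hk, PySem.Dict.keys_insert_of_not_contains _ _ hc', PySem.Set.add_of_not_mem hnm]
        · intro x
          rw [hv x, PySem.Dict.getD_insert]
          split
          · next he =>
              subst he
              exact (PySem.Dict.getD_of_not_contains d _ hc').symm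
          · rfl

lemma pv_nameSets_spec (hosts : List String) (data : List (List (String × String)))
    (d : PySem.Dict String (PySem.Set String))
    (hd : ∀ x, d.contains x = hosts.contains x) :
    ((data.foldl (fun d prog =>
        if d.contains (pvLook prog "hostname") then
          d.insert (pvLook prog "hostname")
            (PySem.Set.add (d.getD (pvLook prog "hostname") []) (pvLook prog "name"))
        else d) d).keys = d.keys) ∧
    ∀ h, (data.foldl (fun d prog =>
        if d.contains (pvLook prog "hostname") then
          d.insert (pvLook prog "hostname")
            (PySem.Set.add (d.getD (pvLook prog "hostname") []) (pvLook prog "name"))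
        else d) d).getD h []
      = ((pvGrp data hosts h).map (fun p => pvLook p "name")).foldl PySem.Set.add (d.getD h []) := by
  induction data generalizing d with
  | nil => exact ⟨rfl, fun h => by simp [pvGrp]⟩
  | cons a l ih =>
      by_cases hc : hosts.contains (pvLook a "hostname") = true
      · have hca : d.contains (pvLook a "hostname") = true := by rw [hd]; exact hc
        have hd' : ∀ x,
            (d.insert (pvLook a "hostname")
              (PySem.Set.add (d.getD (pvLook a "hostname") []) (pvLook a "name"))).contains x
              = hosts.contains x := by
          intro x
          rw [PySem.Dict.contains_insert]
          by_cases hx : x = pvLook a "hostname"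
          · subst hx
            simp only [beq_self_eq_true, Bool.true_or]
            exact hc.symm
          · have : (x == pvLook a "hostname") = false := by simpa using hx
            rw [this, Bool.false_or, hd]
        obtain ⟨hk, hv⟩ := ih _ hd'
        refine ⟨?_, ?_⟩
        · simp only [List.foldl_cons, hca, if_true]
          rw [hk, PySem.Dict.keys_insert_of_contains _ _ hca]
        · intro h
          simp only [List.foldl_cons, hca, if_true]
          rw [hv h, PySem.Dict.getD_insert]
          simp only [pvGrp, List.filter_cons]
          have hmem : pvLook a "hostname" ∈ hosts := by simpa using hc
          by_cases he : pvLook a "hostname" = h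
          · subst he
            simp [hmem]
          · have hbe : (pvLook a "hostname" == h) = false := by simpa using he
            simp [Ne.symm he, hbe, hmem]
      · have hca : d.contains (pvLook a "hostname") = false := by
          rw [hd]; simpa using hc
        obtain ⟨hk, hv⟩ := ih d hd
        refine ⟨?_, ?_⟩
        · simpa only [List.foldl_cons, hca, Bool.false_eq_true, if_false] using hk
        · intro h
          simp only [List.foldl_cons, hca, Bool.false_eq_true, if_false]
          rw [hv h]
          have hnm : pvLook a "hostname" ∉ hosts := by simpa using hc
          simp [pvGrp, hnm]

lemma pv_counts_getD (vs : List (PySem.Set String)) (c : PySem.Dict String Int) (n : String) :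
    (vs.foldl (fun c s => s.foldl (fun c n => c.insert n (c.getD n 0 + 1)) c) c).getD n 0
      = c.getD n 0 + ((vs.map (fun s => (List.count n s : Int))).sum) := by
  induction vs generalizing c with
  | nil => simp
  | cons s vs ih =>
      simp only [List.foldl_cons, List.map_cons, List.sum_cons]
      rw [ih, PySem.Dict.getD_foldl_insert_add_one]
      ring

lemma pv_counts_keys (vs : List (PySem.Set String)) (c : PySem.Dict String Int) :
    (vs.foldl (fun c s => s.foldl (fun c n => c.insert n (c.getD n 0 + 1)) c) c).keys
      = PySem.Set.update c.keys vs.flatten := by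
  induction vs generalizing c with
  | nil => simp [PySem.Set.update]
  | cons s vs ih =>
      simp only [List.foldl_cons, List.flatten_cons]
      rw [ih, PySem.Dict.keys_foldl_insert, PySem.Set.update_append]

lemma pv_count_common {α : Type} (l : List α) (p : α → Bool) (hne : l ≠ []) :
    ((∃ x ∈ l, p x = true) ∧ (l.countP p : Int) = (l.length : Int)) ↔ ∀ x ∈ l, p x = true := by
  constructor
  · rintro ⟨_, hc⟩
    exact List.countP_eq_length.mp (by exact_mod_cast hc)
  · intro H
    refine ⟨?_, by exact_mod_cast List.countP_eq_length.mpr H⟩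
    cases l with
    | nil => exact absurd rfl hne
    | cons a l => exact ⟨a, List.mem_cons_self, H a List.mem_cons_self⟩

lemma pv_count_diff {α : Type} (l : List α) (p : α → Bool) :
    ((∃ x ∈ l, p x = true) ∧ (l.countP p : Int) < (l.length : Int)) ↔
      ((∃ x ∈ l, p x = true) ∧ ¬ ∀ x ∈ l, p x = true) := by
  refine and_congr_right fun _ => ?_
  rw [← List.countP_eq_length (p := p)]
  constructor
  · intro h hc; omega
  · intro hne
    have hle := List.countP_le_length (p := p) (l := l)
    have : l.countP p ≠ l.length := hne
    omega

def pvNS (data : List (List (String × String))) (hosts : List String) :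
    PySem.Dict String (PySem.Set String) :=
  data.foldl (fun d prog =>
    if d.contains (pvLook prog "hostname") then
      d.insert (pvLook prog "hostname")
        (PySem.Set.add (d.getD (pvLook prog "hostname") []) (pvLook prog "name"))
    else d) (hosts.foldl (fun d h => d.setdefault h PySem.Set.empty) PySem.Dict.empty)

def pvCounts (data : List (List (String × String))) (hosts : List String) :
    PySem.Dict String Int :=
  (pvNS data hosts).values.foldl
    (fun c s => s.foldl (fun c n => c.insert n (c.getD n 0 + 1)) c) PySem.Dict.empty

def pvChosen (data : List (List (String × String))) (hosts : List String) (ct : String) :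
    PySem.Set String :=
  (pvCounts data hosts).items.foldl (fun s p =>
    if (if ct == "common" then p.2 == ((pvNS data hosts).size : Int)
        else decide (p.2 < ((pvNS data hosts).size : Int)))
    then PySem.Set.add s p.1 else s) PySem.Set.empty

lemma pv_alt_eq (data : List (List (String × String))) (hosts : List String) (ct : String) :
    compare_programs_alt data hosts ct = data.filter (fun prog =>
      (pvNS data hosts).contains (pvLook prog "hostname") &&
      PySem.Set.contains (pvChosen data hosts ct) (pvLook prog "name")) := rfl

lemma pv_NS_keys (data : List (List (String × String))) (hosts : List String) :
    (pvNS data hosts).keys = PySem.Set.ofList hosts := by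
  have hc0 : ∀ x, (hosts.foldl (fun d h => d.setdefault h PySem.Set.empty)
      (PySem.Dict.empty : PySem.Dict String (PySem.Set String))).contains x
      = hosts.contains x := by
    intro x
    rw [PySem.Dict.contains_eq_decide_mem_keys, (pv_ns0_spec hosts PySem.Dict.empty).1,
      PySem.Dict.keys_empty, PySem.Set.update_nil_left, Bool.eq_iff_iff]
    simp
  rw [pvNS, (pv_nameSets_spec hosts data _ hc0).1, (pv_ns0_spec hosts PySem.Dict.empty).1,
    PySem.Dict.keys_empty, PySem.Set.update_nil_left]

lemma pv_NS_getD (data : List (List (String × String))) (hosts : List String) (h : String) :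
    (pvNS data hosts).getD h [] = pvNset data hosts h := by
  have hc0 : ∀ x, (hosts.foldl (fun d h => d.setdefault h PySem.Set.empty)
      (PySem.Dict.empty : PySem.Dict String (PySem.Set String))).contains x
      = hosts.contains x := by
    intro x
    rw [PySem.Dict.contains_eq_decide_mem_keys, (pv_ns0_spec hosts PySem.Dict.empty).1,
      PySem.Dict.keys_empty, PySem.Set.update_nil_left, Bool.eq_iff_iff]
    simp
  rw [pvNS, (pv_nameSets_spec hosts data _ hc0).2 h, (pv_ns0_spec hosts PySem.Dict.empty).2 h,
    PySem.Dict.getD_empty]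
  exact (PySem.Set.ofList_eq_foldl _).symm

lemma pv_NS_values (data : List (List (String × String))) (hosts : List String) :
    (pvNS data hosts).values = (PySem.Set.ofList hosts).map (fun h => pvNset data hosts h) := by
  rw [PySem.Dict.values_eq_map_keys _ (by rw [pv_NS_keys]; exact PySem.Set.nodup_ofList hosts) [],
    pv_NS_keys]
  exact List.map_congr_left fun h _ => pv_NS_getD data hosts h

lemma pv_NS_size (data : List (List (String × String))) (hosts : List String) :
    (pvNS data hosts).size = (PySem.Set.ofList hosts).length := by
  have : (pvNS data hosts).size = (pvNS data hosts).keys.length := by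
    simp [PySem.Dict.size, PySem.Dict.keys]
  rw [this, pv_NS_keys]

lemma pv_counts_getD' (data : List (List (String × String))) (hosts : List String) (n : String) :
    (pvCounts data hosts).getD n 0
      = ((PySem.Set.ofList hosts).countP (fun h => decide (n ∈ pvNset data hosts h)) : Int) := by
  rw [pvCounts, pv_counts_getD, PySem.Dict.getD_empty, pv_NS_values, zero_add, List.map_map]
  have hmapeq : (PySem.Set.ofList hosts).map ((fun s => (List.count n s : Int)) ∘ (fun h => pvNset data hosts h))
      = (PySem.Set.ofList hosts).map (fun h => if decide (n ∈ pvNset data hosts h) then (1 : Int) else 0) := by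
    refine List.map_congr_left fun h _ => ?_
    simp only [Function.comp_apply]
    have hnd : (pvNset data hosts h).Nodup := by
      rw [pvNset]; exact PySem.Set.nodup_ofList _
    by_cases hm : n ∈ pvNset data hosts h
    · rw [List.count_eq_one_of_mem hnd hm]
      simp [hm]
    · rw [List.count_eq_zero_of_not_mem hm]
      simp [hm]
  rw [hmapeq, PySem.List.sum_map_ite_one_zero]

lemma pv_counts_keys' (data : List (List (String × String))) (hosts : List String) (n : String) :
    n ∈ (pvCounts data hosts).keys ↔ ∃ h ∈ PySem.Set.ofList hosts, n ∈ pvNset data hosts h := by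
  rw [pvCounts, pv_counts_keys, PySem.Dict.keys_empty, PySem.Set.update_nil_left,
    PySem.Set.mem_ofList, pv_NS_values]
  simp only [List.mem_flatten, List.mem_map]
  constructor
  · rintro ⟨s, ⟨h, hh, rfl⟩, hn⟩
    exact ⟨h, hh, hn⟩
  · rintro ⟨h, hh, hn⟩
    exact ⟨_, ⟨h, hh, rfl⟩, hn⟩

lemma pv_counts_nodup (data : List (List (String × String))) (hosts : List String) :
    (pvCounts data hosts).keys.Nodup := by
  rw [pvCounts, pv_counts_keys, PySem.Dict.keys_empty, PySem.Set.update_nil_left]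
  exact PySem.Set.nodup_ofList _

lemma pv_chosen_mem (data : List (List (String × String))) (hosts : List String) (ct : String)
    (n : String) :
    n ∈ pvChosen data hosts ct ↔
      (n ∈ (pvCounts data hosts).keys ∧
        (if ct == "common" then ((pvCounts data hosts).getD n 0 == ((pvNS data hosts).size : Int))
         else decide ((pvCounts data hosts).getD n 0 < ((pvNS data hosts).size : Int))) = true) := by
  rw [pvChosen, pv_mem_foldl_add_if]
  rw [PySem.Dict.items_eq_map_keys _ (pv_counts_nodup data hosts) 0]
  simp only [List.mem_map]
  constructor
  · rintro (hn | ⟨p, ⟨k, hk, rfl⟩, hP, rfl⟩)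
    · cases hn
    · exact ⟨hk, hP⟩
  · rintro ⟨hk, hP⟩
    exact Or.inr ⟨(n, (pvCounts data hosts).getD n 0), ⟨n, hk, rfl⟩, hP, rfl⟩

lemma pv_B_char (data : List (List (String × String))) (hosts : List String) (ct : String)
    (hne : hosts ≠ []) :
    compare_programs_alt data hosts ct = data.filter (pvCond data hosts ct) := by
  have hSne : PySem.Set.ofList hosts ≠ [] := by
    cases hosts with
    | nil => exact absurd rfl hne
    | cons a hs => rw [PySem.Set.ofList_cons]; simp
  rw [pv_alt_eq]
  refine List.filter_congr fun prog _ => ?_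
  rw [Bool.eq_iff_iff]
  simp only [pvCond, Bool.and_eq_true]
  have hfirst : ((pvNS data hosts).contains (pvLook prog "hostname") = true) ↔
      (hosts.contains (pvLook prog "hostname") = true) := by
    rw [PySem.Dict.contains_eq_decide_mem_keys, pv_NS_keys]
    simp [PySem.Set.mem_ofList]
  refine and_congr hfirst ?_
  rw [PySem.Set.contains_iff, pv_chosen_mem]
  by_cases hct : (ct == "common") = true
  · simp only [hct, if_true, beq_iff_eq, decide_eq_true_eq]
    rw [pv_counts_getD', pv_NS_size, pv_counts_keys']
    have h := pv_count_common (PySem.Set.ofList hosts)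
      (fun h => decide (pvLook prog "name" ∈ pvNset data hosts h)) hSne
    simp only [decide_eq_true_eq] at h
    exact h
  · simp only [Bool.not_eq_true] at hct
    simp only [hct, Bool.false_eq_true, if_false, decide_eq_true_eq]
    rw [pv_counts_getD', pv_NS_size, pv_counts_keys']
    have h := pv_count_diff (PySem.Set.ofList hosts)
      (fun h => decide (pvLook prog "name" ∈ pvNset data hosts h))
    simp only [decide_eq_true_eq] at h
    exact h


-- ===== VERDICT (by name: the statement is the Claim_ definition above) =====
theorem compare_programs_spec : Claim_equal_compare_programs := by
  intro data selected_hosts compare_type _ hpre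
  unfold Spec_compare_programs
  rw [pv_A_char data selected_hosts compare_type hpre.1,
    pv_B_char data selected_hosts compare_type hpre.1]
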